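-- pv_equiv track=rewrite | github.com/royerlab/aydin | aydin/util/array/nd.py | nd_range_radii
-- ===== SOURCE A (Python) =====
-- def nd_range_radii(radii):
--     """Generate all n-dimensional index tuples within given radii per axis.
--
--     For each axis, iterates from ``-radius`` to ``+radius`` (inclusive),
--     producing all possible coordinate tuples.
--
--     Parameters
--     ----------
--     radii : list of int
--         Radius for each dimension.
--
--     Yields
--     ------
--     tuple of int
--         Index tuples spanning the given radii.
--     """
--     if not radii:
--         yield ()
--         return
--
--     for outer in nd_range_radii(radii[:-1]):
--
--         radius = radii[-1]
--         start = -radius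
--         stop = +radius + 1
--
--         for inner in range(start, stop):
--             yield outer + (inner,)
-- ===== SOURCE B (Python) =====
-- def nd_range_radii(radii):
--     acc = [()]
--     for radius in radii:
--         acc = [prefix + (inner,) for prefix in acc
--                for inner in range(-radius, radius + 1)]
--     yield from acc
-- ===== Notes on version B (the rewrite author's own statement) =====
-- stated objective: alternative
-- what changed: Replaces the recursion on radii[:-1] (one recursive generator frame per axis) by a single left-to-right loop maintaining the list of prefix tuples built so far.
import Mathlib
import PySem

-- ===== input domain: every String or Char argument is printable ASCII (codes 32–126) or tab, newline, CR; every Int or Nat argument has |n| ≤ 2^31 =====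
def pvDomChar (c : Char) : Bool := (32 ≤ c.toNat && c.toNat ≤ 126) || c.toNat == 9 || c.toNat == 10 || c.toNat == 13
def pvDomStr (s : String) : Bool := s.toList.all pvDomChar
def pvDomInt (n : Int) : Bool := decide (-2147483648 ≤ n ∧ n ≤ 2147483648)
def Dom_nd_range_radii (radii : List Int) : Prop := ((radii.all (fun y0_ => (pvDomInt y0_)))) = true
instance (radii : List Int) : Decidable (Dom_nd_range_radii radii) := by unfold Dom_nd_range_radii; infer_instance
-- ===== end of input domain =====

-- B replaces A's recursion on radii[:-1] by one left-to-right loop over a growing prefix list; same values, same order.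

-- ===== PORT A =====
-- A recurses on radii[:-1] and, for each outer tuple, appends each inner in range(-radii[-1], radii[-1]+1).
def nd_range_radii (radii : List Int) : List (List Int) :=
  if radii = [] then [[]]
  else
    (nd_range_radii (PySem.List.slice radii none (some (-1)))).flatMap (fun outer =>
      let radius := (PySem.List.pyGet? radii (-1)).getD 0   -- radii ≠ [], so pyGet? is some
      let start := -radius
      let stop := radius + 1
      (PySem.List.pyRange start stop 1).map (fun inner => outer ++ [inner]))
termination_by radii.length
decreasing_by
  simp [PySem.List.slice_to_neg_one]
  cases radii with
  | nil => simp_all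
  | cons x xs => simp

-- ===== PORT B =====
-- B: acc = [()]; for radius in radii: acc = [p + (i,) for p in acc for i in range(-radius, radius+1)]
def nd_range_radii_alt (radii : List Int) : List (List Int) :=
  radii.foldl (fun acc radius =>
    acc.flatMap (fun prefix_ =>
      (PySem.List.pyRange (-radius) (radius + 1) 1).map (fun inner => prefix_ ++ [inner])))
    [[]]

-- ===== PRECONDITION & SPEC =====
def Spec_nd_range_radii (radii : List Int) (out : List (List Int)) : Prop := out = nd_range_radii_alt radii
instance (radii : List Int) (out : List (List Int)) : Decidable (Spec_nd_range_radii radii out) := by unfold Spec_nd_range_radii; infer_instance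

-- ===== CLAIM (what is proved, stated in full; the proofs are below) =====
def Claim_equal_nd_range_radii : Prop := ∀ (radii : List Int), Dom_nd_range_radii radii → Spec_nd_range_radii radii (nd_range_radii radii)

-- ===== LEMMAS AND PROOFS =====

theorem nd_range_radii_snoc (xs : List Int) (r : Int) :
    nd_range_radii (xs ++ [r]) =
      (nd_range_radii xs).flatMap (fun outer =>
        (PySem.List.pyRange (-r) (r + 1) 1).map (fun inner => outer ++ [inner])) := by
  rw [nd_range_radii]
  simp [PySem.List.slice_to_neg_one, PySem.List.pyGet?_neg_one]

theorem nd_range_radii_eq_alt (radii : List Int) :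
    nd_range_radii radii = nd_range_radii_alt radii := by
  induction radii using List.reverseRecOn with
  | nil => simp [nd_range_radii, nd_range_radii_alt]
  | append_singleton xs r ih =>
      rw [nd_range_radii_snoc, ih]
      simp [nd_range_radii_alt, List.foldl_append]

-- ===== VERDICT (by name: the statement is the Claim_ definition above) =====
theorem nd_range_radii_spec : Claim_equal_nd_range_radii := by
  intro radii _
  unfold Spec_nd_range_radii
  exact nd_range_radii_eq_alt radii
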